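-- pv_equiv track=rewrite | github.com/wen-wei-055/EQ-RA | CESNet/train.py | latlondep_ID
-- ===== SOURCE A (Python) =====
-- def latlondep_ID(stations_table):
--     appear_first = {}
--     appear_dic = {}
--     i = 0
--     for id_name, instrument_name in enumerate(stations_table):
--         latlondep = ','.join(instrument_name.split(',')[:3])
--         if latlondep not in appear_first.keys():
--             appear_first[latlondep] = i
--             appear_dic[id_name] = i
--             i += 1
--         if latlondep in appear_first.keys():
--             appear_dic[id_name] = appear_first[latlondep]
--     return appear_dic
-- ===== SOURCE B (Python) =====
-- def latlondep_ID(stations_table):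
--     prefixes = [','.join(name.split(',')[:3]) for name in stations_table]
--     first = {}
--     for i, p in enumerate(prefixes):
--         first.setdefault(p, i)
--     rank = {f: r for r, f in enumerate(sorted(first.values()))}
--     return {i: rank[first[p]] for i, p in enumerate(prefixes)}
-- ===== Notes on version B (the rewrite author's own statement) =====
-- stated objective: alternative
-- what changed: A assigns incremental ids with a manual counter and two dicts updated inside one loop; B never runs a counter: it records each prefix's first-occurrence position (setdefault), ranks those positions by sorting them, and maps every station to the rank of its prefix's first occurrence.
import Mathlib
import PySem

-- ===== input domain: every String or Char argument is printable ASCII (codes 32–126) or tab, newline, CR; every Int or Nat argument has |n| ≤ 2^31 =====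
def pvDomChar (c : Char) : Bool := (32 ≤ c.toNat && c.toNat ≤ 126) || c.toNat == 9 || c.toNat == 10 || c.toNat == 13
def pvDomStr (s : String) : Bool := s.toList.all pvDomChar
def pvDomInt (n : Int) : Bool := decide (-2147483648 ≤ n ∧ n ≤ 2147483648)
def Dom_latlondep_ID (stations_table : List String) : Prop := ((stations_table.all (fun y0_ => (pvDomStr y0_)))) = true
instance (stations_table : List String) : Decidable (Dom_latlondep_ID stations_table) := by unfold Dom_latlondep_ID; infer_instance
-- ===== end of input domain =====

-- B drops A's manual id counter and id dict entirely: it records each prefix's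
-- first-occurrence position, sorts those positions, and maps each station to the rank
-- of its prefix's first occurrence; objective: alternative algorithm, similar cost.

-- ','.join(name.split(',')[:3]) — the identical expression appears in both Pythons.
-- split? is exact for the nonempty separator ","; its `none` case (empty separator) is unreachable.
def pvPrefix3 (name : String) : String :=
  PySem.Str.join "," (PySem.List.slice ((PySem.Str.split? name ",").getD []) none (some 3))

-- ===== PORT A =====
-- loop body of A's single for-loop (state: appear_first, appear_dic, i)
def pvStepA (st : PySem.Dict String Int × PySem.Dict Int Int × Int) (p : Int × String) :
    PySem.Dict String Int × PySem.Dict Int Int × Int :=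
  let latlondep := pvPrefix3 p.2
  let st :=
    if st.1.contains latlondep then st
    else (st.1.insert latlondep st.2.2, st.2.1.insert p.1 st.2.2, st.2.2 + 1)
  match st.1.get? latlondep with
  | some v => (st.1, st.2.1.insert p.1 v, st.2.2)
  | none => st

def latlondep_ID (stations_table : List String) : List (Int × Int) :=
  ((PySem.List.enumerate stations_table 0).foldl pvStepA
    (PySem.Dict.empty, PySem.Dict.empty, 0)).2.1.items

-- ===== PORT B =====
-- first.setdefault(p, i): insert only if the key is absent
def pvFirstStep (d : PySem.Dict String Int) (ip : Int × String) : PySem.Dict String Int :=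
  if d.contains ip.2 then d else d.insert ip.2 ip.1

-- {f: r for r, f in enumerate(sorted(first.values()))}
def pvRankStep (d : PySem.Dict Int Int) (rf : Int × Int) : PySem.Dict Int Int :=
  d.insert rf.2 rf.1

-- rank[first[p]] raises KeyError only when p was never seen, which cannot happen (first
-- was built from the very list p is drawn from); the `.getD 0` defaults are unreachable.
def latlondep_ID_alt (stations_table : List String) : List (Int × Int) :=
  let prefixes := stations_table.map pvPrefix3
  let first := (PySem.List.enumerate prefixes 0).foldl pvFirstStep PySem.Dict.empty
  let rank := (PySem.List.enumerate (PySem.List.sorted first.values (fun v => v)) 0).foldl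
    pvRankStep PySem.Dict.empty
  ((PySem.List.enumerate prefixes 0).foldl
    (fun (d : PySem.Dict Int Int) ip => d.insert ip.1 (rank.getD (first.getD ip.2 0) 0))
    PySem.Dict.empty).items

-- ===== PRECONDITION & SPEC =====
def Spec_latlondep_ID (stations_table : List String) (out : List (Int × Int)) : Prop := out = latlondep_ID_alt stations_table
instance (stations_table : List String) (out : List (Int × Int)) : Decidable (Spec_latlondep_ID stations_table out) := by unfold Spec_latlondep_ID; infer_instance

-- ===== CLAIM (what is proved, stated in full; the proofs are below) =====
def Claim_equal_latlondep_ID : Prop := ∀ (stations_table : List String), Dom_latlondep_ID stations_table → Spec_latlondep_ID stations_table (latlondep_ID stations_table)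

-- ===== LEMMAS AND PROOFS =====

-- A's appear_first step / fold, named for the proofs
def pvStepAF (d : PySem.Dict String Int) (p : String) : PySem.Dict String Int :=
  if d.contains p then d else d.insert p (PySem.Dict.size d : Int)

def pvAF (d : PySem.Dict String Int) (ps : List String) : PySem.Dict String Int :=
  ps.foldl pvStepAF d

-- once a prefix is in appear_first, later steps never change its value
theorem pvAF_get?_of_contains (ps : List String) (d : PySem.Dict String Int) (p : String)
    (h : d.contains p = true) : (pvAF d ps).get? p = d.get? p := by
  induction ps generalizing d with
  | nil => rfl
  | cons q qs ih =>
    show (pvAF (pvStepAF d q) qs).get? p = d.get? p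
    unfold pvStepAF
    by_cases hq : d.contains q = true
    · rw [if_pos hq]; exact ih d h
    · rw [if_neg hq]
      have hne : p ≠ q := fun he => by rw [he] at h; exact hq h
      rw [ih _ (by simp [PySem.Dict.contains_insert, h]),
        PySem.Dict.get?_insert_of_ne _ _ hne]

theorem pvEnumerate_map {α β : Type} (f : α → β) (xs : List α) (s : Int) :
    PySem.List.enumerate (xs.map f) s =
      (PySem.List.enumerate xs s).map (fun ip => (ip.1, f ip.2)) := by
  induction xs generalizing s with
  | nil => rfl
  | cons x xs ih => simp [PySem.List.enumerate_cons, ih]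

-- A's appear_first dict, run over any tail, stays in lockstep with the first-seen dedup
-- list (PySem.Set.ofList's fold): same size, and get? = position in the list.
theorem pvAF_index (ps : List String) (af : PySem.Dict String Int) (ord : List String)
    (hsz : (PySem.Dict.size af : Int) = (ord.length : Int))
    (hget : ∀ p, af.get? p = (PySem.List.index? ord p).map Int.ofNat) :
    (PySem.Dict.size (pvAF af ps) : Int) = ((ps.foldl PySem.Set.add ord).length : Int) ∧
      ∀ p, (pvAF af ps).get? p =
        (PySem.List.index? (ps.foldl PySem.Set.add ord) p).map Int.ofNat := by
  induction ps generalizing af ord with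
  | nil => exact ⟨hsz, hget⟩
  | cons q qs ih =>
    have hc : af.contains q = decide (q ∈ ord) := by
      rw [PySem.Dict.contains_eq_isSome_get?, hget q]
      rcases hmem : PySem.List.index? ord q with _ | k
      · simp [(PySem.List.index?_eq_none_iff ord q).mp hmem]
      · have : q ∈ ord := (PySem.List.index?_isSome_iff ord q).mp (by rw [hmem]; rfl)
        simp [this]
    show (PySem.Dict.size (pvAF (pvStepAF af q) qs) : Int) =
        ((qs.foldl PySem.Set.add (PySem.Set.add ord q)).length : Int) ∧
      ∀ p, (pvAF (pvStepAF af q) qs).get? p =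
        (PySem.List.index? (qs.foldl PySem.Set.add (PySem.Set.add ord q)) p).map Int.ofNat
    by_cases hq : q ∈ ord
    · have h1 : pvStepAF af q = af := by rw [pvStepAF, hc]; simp [hq]
      have h2 : PySem.Set.add ord q = ord := by
        simp [PySem.Set.add, List.contains_eq_mem, hq]
      rw [h1, h2]; exact ih af ord hsz hget
    · have h1 : pvStepAF af q = af.insert q (PySem.Dict.size af : Int) := by
        rw [pvStepAF, hc]; simp [hq]
      have h2 : PySem.Set.add ord q = ord ++ [q] := by
        simp [PySem.Set.add, List.contains_eq_mem, hq]
      rw [h1, h2]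
      refine ih _ _ ?_ ?_
      · rw [PySem.Dict.size_insert, hc]
        simp [hq]; omega
      · intro p
        by_cases hp : p = q
        · subst hp
          rw [PySem.Dict.get?_insert_self, hsz,
            PySem.List.index?_append_singleton_self ord p hq]
          simp
        · rw [PySem.Dict.get?_insert_of_ne _ _ hp, hget p]
          by_cases hpo : p ∈ ord
          · rw [PySem.List.index?_append_of_mem _ hpo]
          · rw [(PySem.List.index?_eq_none_iff ord p).mpr hpo,
              (PySem.List.index?_eq_none_iff _ p).mpr (by simp [hpo, hp])]

-- A's single loop, started in any state whose counter equals the size of appear_first and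
-- whose appear_dic keys are all below the next index, equals a pass that looks each prefix
-- up in the finished appear_first.
theorem pvLoopA (names : List String) (af : PySem.Dict String Int) (ad : PySem.Dict Int Int)
    (n : Int) (had : ∀ k ∈ ad.keys, k < n) :
    (PySem.List.enumerate names n).foldl pvStepA (af, ad, (PySem.Dict.size af : Int)) =
      (pvAF af (names.map pvPrefix3),
       (PySem.List.enumerate names n).foldl
         (fun (d : PySem.Dict Int Int) ip =>
           d.insert ip.1 ((pvAF af (names.map pvPrefix3)).getD (pvPrefix3 ip.2) 0)) ad,
       (PySem.Dict.size (pvAF af (names.map pvPrefix3)) : Int)) := by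
  induction names generalizing af ad n with
  | nil => simp [PySem.List.enumerate_nil, pvAF]
  | cons name names ih =>
    rw [PySem.List.enumerate_cons]
    have had' : ∀ v : Int, ∀ k ∈ (ad.insert n v).keys, k < n + 1 := by
      intro v k hk
      rcases (PySem.Dict.mem_keys_insert ad n k v).mp hk with h | h
      · omega
      · have := had k h; omega
    by_cases hc : af.contains (pvPrefix3 name) = true
    · obtain ⟨v, hv⟩ : ∃ v, af.get? (pvPrefix3 name) = some v :=
        Option.isSome_iff_exists.1
          (by rw [← PySem.Dict.contains_eq_isSome_get?]; exact hc)
      have hstep : pvStepA (af, ad, (PySem.Dict.size af : Int)) (n, name) =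
          (af, ad.insert n v, (PySem.Dict.size af : Int)) := by
        simp only [pvStepA]
        rw [if_pos hc]
        simp [hv]
      have hps : pvAF af (pvPrefix3 name :: names.map pvPrefix3) =
          pvAF af (names.map pvPrefix3) := by
        show pvAF (pvStepAF af (pvPrefix3 name)) (names.map pvPrefix3) = _
        rw [pvStepAF, if_pos hc]
      have hcontains : (pvAF af (names.map pvPrefix3)).get? (pvPrefix3 name) = some v := by
        rw [pvAF_get?_of_contains _ _ _ hc, hv]
      have hval : (pvAF af (names.map pvPrefix3)).getD (pvPrefix3 name) 0 = v := by
        rw [PySem.Dict.getD_eq_get?_getD, hcontains]; rfl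
      rw [List.foldl_cons, hstep, ih af (ad.insert n v) (n + 1) (had' v)]
      simp only [List.map_cons, List.foldl_cons, hps, hval]
    · have hstep : pvStepA (af, ad, (PySem.Dict.size af : Int)) (n, name) =
          (af.insert (pvPrefix3 name) (PySem.Dict.size af : Int),
           ad.insert n (PySem.Dict.size af : Int),
           (PySem.Dict.size (af.insert (pvPrefix3 name) (PySem.Dict.size af : Int)) : Int)) := by
        simp only [pvStepA]
        rw [if_neg hc]
        simp only [PySem.Dict.get?_insert_self, PySem.Dict.insert_insert_self,
          PySem.Dict.size_insert]
        simp [hc]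
      have hps : pvAF af (pvPrefix3 name :: names.map pvPrefix3) =
          pvAF (af.insert (pvPrefix3 name) (PySem.Dict.size af : Int)) (names.map pvPrefix3) := by
        show pvAF (pvStepAF af (pvPrefix3 name)) (names.map pvPrefix3) = _
        rw [pvStepAF, if_neg hc]
      have hval : (pvAF (af.insert (pvPrefix3 name) (PySem.Dict.size af : Int))
          (names.map pvPrefix3)).getD (pvPrefix3 name) 0 = (PySem.Dict.size af : Int) := by
        rw [PySem.Dict.getD_eq_get?_getD,
          pvAF_get?_of_contains _ _ _ (PySem.Dict.contains_insert_self _ _ _),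
          PySem.Dict.get?_insert_self]; rfl
      rw [List.foldl_cons, hstep,
        ih (af.insert (pvPrefix3 name) (PySem.Dict.size af : Int))
          (ad.insert n (PySem.Dict.size af : Int)) (n + 1) (had' _)]
      simp only [List.map_cons, List.foldl_cons, hps, hval]

-- B's first dict: keys evolve exactly like the first-seen dedup of the prefixes, and the
-- recorded first-occurrence positions are strictly increasing and bounded by the next index.
theorem pvFirstFold (ps : List String) (d : PySem.Dict String Int) (n : Int)
    (hvb : ∀ v ∈ d.values, v < n) (hvp : d.values.Pairwise (· < ·)) :
    ((PySem.List.enumerate ps n).foldl pvFirstStep d).keys = ps.foldl PySem.Set.add d.keys ∧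
    ((PySem.List.enumerate ps n).foldl pvFirstStep d).values.Pairwise (· < ·) := by
  induction ps generalizing d n with
  | nil => exact ⟨rfl, hvp⟩
  | cons q qs ih =>
    rw [PySem.List.enumerate_cons, List.foldl_cons, List.foldl_cons]
    by_cases hq : d.contains q = true
    · have h1 : pvFirstStep d (n, q) = d := by rw [pvFirstStep, if_pos hq]
      have hmem : q ∈ d.keys := by
        have := PySem.Dict.contains_eq_decide_mem_keys d q
        rw [hq] at this; exact of_decide_eq_true this.symm
      have h2 : PySem.Set.add d.keys q = d.keys := by
        simp [PySem.Set.add, List.contains_eq_mem, hmem]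
      rw [h1, h2]
      exact ih d (n + 1) (fun v hv => by have := hvb v hv; omega) hvp
    · have hqf : d.contains q = false := by simpa using hq
      have h1 : pvFirstStep d (n, q) = d.insert q n := by rw [pvFirstStep, if_neg hq]
      have hmem : q ∉ d.keys := by
        have := PySem.Dict.contains_eq_decide_mem_keys d q
        rw [hqf] at this
        exact of_decide_eq_false this.symm
      have h2 : PySem.Set.add d.keys q = d.keys ++ [q] := by
        simp [PySem.Set.add, List.contains_eq_mem, hmem]
      have hkeys : (d.insert q n).keys = d.keys ++ [q] := by
        simp [PySem.Dict.keys, PySem.Dict.items_insert, hq]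
      have hvals : (d.insert q n).values = d.values ++ [n] := by
        simp [PySem.Dict.values, PySem.Dict.items_insert, hq]
      rw [h1, h2]
      have hb' : ∀ v ∈ (d.insert q n).values, v < n + 1 := by
        rw [hvals]; intro v hv
        rcases List.mem_append.mp hv with h | h
        · have := hvb v h; omega
        · simp at h; omega
      have hp' : (d.insert q n).values.Pairwise (· < ·) := by
        rw [hvals, List.pairwise_append]
        exact ⟨hvp, by simp, fun a ha b hb => by simp at hb; subst hb; exact hvb a ha⟩
      have := ih (d.insert q n) (n + 1) hb' hp'
      rw [hkeys] at this; exact this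

-- B's rank dict: position of each value of a duplicate-free list, offset by the start index.
theorem pvRankFold (vs : List Int) (d : PySem.Dict Int Int) (n : Int) (hnd : vs.Nodup) :
    ∀ v, ((PySem.List.enumerate vs n).foldl pvRankStep d).get? v =
      match PySem.List.index? vs v with
      | some k => some (n + (k : Int))
      | none => d.get? v := by
  induction vs generalizing d n with
  | nil =>
    intro v
    simp [PySem.List.enumerate_nil, PySem.List.index?_eq_idxOf?]
  | cons u vs ih =>
    intro v
    rw [PySem.List.enumerate_cons, List.foldl_cons]
    have hnd' := (List.nodup_cons.mp hnd).2
    have hu : u ∉ vs := (List.nodup_cons.mp hnd).1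
    have hstep : pvRankStep d (n, u) = d.insert u n := rfl
    rw [hstep, ih (d.insert u n) (n + 1) hnd' v]
    by_cases hv : v = u
    · subst hv
      rw [(PySem.List.index?_eq_none_iff vs v).mpr hu,
        PySem.List.index?_cons_self]
      simp [PySem.Dict.get?_insert_self]
    · rw [PySem.List.index?_cons_of_ne vs (fun h => hv h.symm)]
      rcases hi : PySem.List.index? vs v with _ | k
      · simp [PySem.Dict.get?_insert_of_ne _ _ hv]
      · have : (n + 1) + (k : Int) = n + (((k + 1 : Nat)) : Int) := by push_cast; ring
        simp [this]

-- a value looked up in an association list is among its values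
theorem pvGetMemValues {κ ν : Type} [BEq κ] (L : List (κ × ν)) (p : κ) (v : ν)
    (h : (PySem.Dict.mk L).get? p = some v) : v ∈ L.map Prod.snd := by
  induction L with
  | nil => simp [PySem.Dict.get?] at h
  | cons kv rest ih =>
    rw [PySem.Dict.get?_mk_cons] at h
    by_cases hk : (kv.1 == p) = true
    · rw [if_pos hk] at h
      simp at h; simp [h]
    · rw [if_neg hk] at h
      exact List.mem_cons_of_mem _ (ih h)

-- in an association list with duplicate-free values, the looked-up value sits at the same
-- position among the values as the key does among the keys
theorem pvPairing (L : List (String × Int)) (hnd : (L.map Prod.snd).Nodup) (p : String)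
    (v : Int) (h : (PySem.Dict.mk L).get? p = some v) :
    PySem.List.index? (L.map Prod.snd) v = PySem.List.index? (L.map Prod.fst) p := by
  induction L with
  | nil => simp [PySem.Dict.get?] at h
  | cons kv rest ih =>
    rw [PySem.Dict.get?_mk_cons] at h
    simp only [List.map_cons]
    by_cases hk : kv.1 = p
    · rw [if_pos (by simp [hk])] at h
      have hv : kv.2 = v := by simpa using h
      rw [hk, hv, PySem.List.index?_cons_self, PySem.List.index?_cons_self]
    · rw [if_neg (by simp [hk])] at h
      have hvm : v ∈ rest.map Prod.snd := pvGetMemValues rest p v h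
      have hvne : kv.2 ≠ v := fun he => (List.nodup_cons.mp hnd).1 (he ▸ hvm)
      rw [PySem.List.index?_cons_of_ne _ hvne, PySem.List.index?_cons_of_ne _ hk,
        ih (List.nodup_cons.mp hnd).2 h]

-- B's composed lookup rank[first[p]] is the position of p in the first-seen dedup list.
theorem pvBval (ps : List String) (p : String) (hp : p ∈ ps) :
    (((PySem.List.enumerate
        (PySem.List.sorted
          ((PySem.List.enumerate ps 0).foldl pvFirstStep PySem.Dict.empty).values
          (fun v => v)) 0).foldl pvRankStep PySem.Dict.empty).getD
      (((PySem.List.enumerate ps 0).foldl pvFirstStep PySem.Dict.empty).getD p 0) 0) =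
    (((PySem.List.index? (ps.foldl PySem.Set.add ([] : List String)) p).getD 0 : Nat) : Int) := by
  have hv0 : (PySem.Dict.empty : PySem.Dict String Int).values = [] := rfl
  have hf := pvFirstFold ps PySem.Dict.empty 0
    (by rw [hv0]; intro v hv; simp at hv) (by rw [hv0]; exact List.Pairwise.nil)
  set F := (PySem.List.enumerate ps 0).foldl pvFirstStep PySem.Dict.empty with hF
  have hkeys0 : (PySem.Dict.empty : PySem.Dict String Int).keys = ([] : List String) := rfl
  rw [hkeys0] at hf
  have hsorted : PySem.List.sorted F.values (fun v => v) = F.values :=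
    PySem.List.sorted_eq_of_perm_of_pairwise_lt F.values F.values (fun v => v)
      (List.Perm.refl _) hf.2
  have hnd : F.values.Nodup := hf.2.imp (fun h => ne_of_lt h)
  -- p is a key of F
  have hpk : p ∈ F.keys := by
    rw [hf.1]
    exact (PySem.Set.mem_ofList ps p).mpr hp
  obtain ⟨v, hv⟩ : ∃ v, F.get? p = some v := by
    refine Option.isSome_iff_exists.1 ?_
    rw [← PySem.Dict.contains_eq_isSome_get?, PySem.Dict.contains_eq_decide_mem_keys]
    exact decide_eq_true hpk
  have hFgetD : F.getD p 0 = v := by rw [PySem.Dict.getD_eq_get?_getD, hv]; rfl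
  -- position of v among values = position of p among keys
  have hpair : PySem.List.index? F.values v = PySem.List.index? F.keys p :=
    pvPairing F.items hnd p v hv
  obtain ⟨k, hk⟩ : ∃ k, PySem.List.index? F.keys p = some k :=
    Option.isSome_iff_exists.1 ((PySem.List.index?_isSome_iff F.keys p).mpr hpk)
  have hrank := pvRankFold F.values PySem.Dict.empty 0 hnd v
  rw [hpair, hk] at hrank
  rw [hf.1] at hk
  rw [hsorted, hFgetD, PySem.Dict.getD_eq_get?_getD, hrank, hk]
  simp

-- ===== VERDICT (by name: the statement is the Claim_ definition above) =====
theorem latlondep_ID_spec : Claim_equal_latlondep_ID := by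
  intro st _
  show latlondep_ID st = latlondep_ID_alt st
  have hl := pvLoopA st PySem.Dict.empty PySem.Dict.empty 0 (by simp [PySem.Dict.keys_empty])
  simp only [PySem.Dict.size_empty, Nat.cast_zero] at hl
  have hidx := pvAF_index (st.map pvPrefix3) PySem.Dict.empty []
    (by simp [PySem.Dict.size_empty]) (by intro p; simp [PySem.Dict.get?_empty])
  -- A's stored id for any prefix, as a position in the first-seen dedup list
  have hA : ∀ q : String,
      (pvAF PySem.Dict.empty (st.map pvPrefix3)).getD q 0 =
      (((PySem.List.index? ((st.map pvPrefix3).foldl PySem.Set.add ([] : List String)) q).getD 0 : Nat) : Int) := by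
    intro q
    rw [PySem.Dict.getD_eq_get?_getD, hidx.2 q]
    rcases PySem.List.index? ((st.map pvPrefix3).foldl PySem.Set.add ([] : List String)) q with _ | k
    · rfl
    · rfl
  -- A's loop written as a fold over the enumerated prefixes
  have hsw : (PySem.List.enumerate (st.map pvPrefix3) 0).foldl
      (fun (d : PySem.Dict Int Int) ip =>
        d.insert ip.1 ((pvAF PySem.Dict.empty (st.map pvPrefix3)).getD ip.2 0))
      PySem.Dict.empty =
      (PySem.List.enumerate st 0).foldl
      (fun (d : PySem.Dict Int Int) ip =>
        d.insert ip.1 ((pvAF PySem.Dict.empty (st.map pvPrefix3)).getD (pvPrefix3 ip.2) 0))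
      PySem.Dict.empty := by
    rw [pvEnumerate_map, List.foldl_map]
  show ((PySem.List.enumerate st 0).foldl pvStepA
      (PySem.Dict.empty, PySem.Dict.empty, 0)).2.1.items = _
  rw [hl]
  simp only [latlondep_ID_alt]
  rw [← hsw]
  congr 1
  refine PySem.List.foldl_congr_mem _ _ _ _ ?_
  intro acc ip hip
  have hmem : ip.2 ∈ st.map pvPrefix3 := by
    obtain ⟨k, hk, he⟩ := (PySem.List.mem_enumerate_iff _ _ _).mp hip
    subst he
    have hk' : k < st.length := by simpa using hk
    exact List.mem_map.mpr ⟨st[k], List.getElem_mem hk', by simp⟩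
  rw [hA ip.2, ← pvBval (st.map pvPrefix3) ip.2 hmem]
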